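-- pv_equiv track=rewrite | github.com/viniics/algorithms | atal-simulado-1/questao3-recursive.py | vasily_helper
-- ===== SOURCE A (Python) =====
-- def vasily_helper(a, b,path):
--
--     if(a>b):
--         return None
--
--     path.append(a)
--
--     if(a==b):
--         return path
--
--     path_dobrar = path.copy()
--     path_adicionar_um = path.copy()
--
--     result = vasily_helper(a * 2, b, path_dobrar)
--     if result:
--         return result
--
--     result = vasily_helper(a * 10 + 1, b, path_adicionar_um)
--     if result:
--         return result
--
--     return None
-- ===== SOURCE B (Python) =====
-- def vasily_helper(a, b, path):
--     # B reconstructs the (unique) operation chain backward from b: each value's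
--     # predecessor is forced (halve if even, strip a trailing decimal 1 otherwise).
--     # Return-value equivalence only: A appends to `path` in place, B does not mutate it.
--     if a > b:
--         return None
--     vals = [b]
--     cur = b
--     while cur > a:
--         if cur % 2 == 0:
--             cur //= 2
--         elif cur % 10 == 1:
--             cur //= 10
--         else:
--             return None
--         vals.append(cur)
--     if cur != a:
--         return None
--     return path + vals[::-1]
-- ===== Notes on version B (the rewrite author's own statement) =====
-- stated objective: alternative
-- what changed: A does a recursive forward tree search from a trying *2 then *10+1 with path copies at every node; B reconstructs the unique chain backward from b in one loop (halve if even, strip a trailing decimal 1 otherwise), since every value has at most one predecessor.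
import Mathlib
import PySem

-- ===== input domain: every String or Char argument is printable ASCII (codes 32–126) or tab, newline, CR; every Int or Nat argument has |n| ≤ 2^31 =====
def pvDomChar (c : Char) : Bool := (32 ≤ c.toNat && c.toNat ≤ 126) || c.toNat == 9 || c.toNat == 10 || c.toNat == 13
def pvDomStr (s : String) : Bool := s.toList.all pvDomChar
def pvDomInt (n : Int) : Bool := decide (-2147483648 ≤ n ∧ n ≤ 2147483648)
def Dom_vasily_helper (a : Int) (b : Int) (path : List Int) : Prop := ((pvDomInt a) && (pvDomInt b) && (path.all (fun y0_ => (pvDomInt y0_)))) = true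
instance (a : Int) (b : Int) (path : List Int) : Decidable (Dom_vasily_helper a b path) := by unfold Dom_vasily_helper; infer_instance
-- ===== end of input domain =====

-- B replaces A's forward recursive tree search (try *2, then *10+1, copying the path at
-- every node) by a single backward loop from b: each value has at most one predecessor
-- (b/2 if b is even, else b/10 if b ends in decimal digit 1), so the chain is unique.
-- Return-value equivalence only: Python A appends to `path` in place, B does not mutate it.

-- ===== PORT A =====
-- Python truthiness of `if result:` — result is None or a list; truthy = non-None and nonempty
def pvTruthyA (o : Option (List Int)) : Bool :=
  match o with
  | some l => !l.isEmpty
  | none => false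

-- fuel only makes the recursion total; within Pre_ the initial fuel is never exhausted
def goA : Nat → Int → Int → List Int → Option (List Int)
  | 0, _, _, _ => none
  | f+1, a, b, path =>
    if a > b then none
    else
      let path1 := path ++ [a]
      if a = b then some path1
      else
        let r1 := goA f (a * 2) b path1
        if pvTruthyA r1 then r1
        else
          let r2 := goA f (a * 10 + 1) b path1
          if pvTruthyA r2 then r2
          else none

def vasily_helper (a : Int) (b : Int) (path : List Int) : Option (List Int) :=
  goA ((b - a).toNat + 1) a b path

-- ===== PORT B =====
-- fuel only makes the loop total; within Pre_ the initial fuel is never exhausted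
def goB : Nat → Int → Int → List Int → List Int → Option (List Int)
  | 0, _, _, _, _ => none
  | f+1, a, cur, vals, path =>
    if cur > a then
      if PySem.Int.mod cur 2 = 0 then
        goB f a (PySem.Int.floordiv cur 2) (vals ++ [PySem.Int.floordiv cur 2]) path
      else if PySem.Int.mod cur 10 = 1 then
        goB f a (PySem.Int.floordiv cur 10) (vals ++ [PySem.Int.floordiv cur 10]) path
      else none
    else if cur = a then some (path ++ vals.reverse)
    else none

def vasily_helper_alt (a : Int) (b : Int) (path : List Int) : Option (List Int) :=
  if a > b then none
  else goB ((b - a).toNat + 1) a b [b] path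

-- ===== PRECONDITION & SPEC =====
-- Pre_ excludes exactly the inputs (a ≤ 0 and a < b) on which Python A never returns:
-- there the recursion cannot terminate and A raises RecursionError.
def Pre_vasily_helper (a : Int) (b : Int) (path : List Int) : Prop :=
  a > b ∨ a = b ∨ 1 ≤ a
instance (a : Int) (b : Int) (path : List Int) : Decidable (Pre_vasily_helper a b path) := by unfold Pre_vasily_helper; infer_instance

def pvWitness_vasily_helper : Int × Int × List Int := (1, 21, [7])

def Spec_vasily_helper (a : Int) (b : Int) (path : List Int) (out : Option (List Int)) : Prop := out = vasily_helper_alt a b path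
instance (a : Int) (b : Int) (path : List Int) (out : Option (List Int)) : Decidable (Spec_vasily_helper a b path out) := by unfold Spec_vasily_helper; infer_instance

-- ===== CLAIM (what is proved, stated in full; the proofs are below) =====
def Claim_equal_vasily_helper : Prop := ∀ (a : Int) (b : Int) (path : List Int), Dom_vasily_helper a b path → Pre_vasily_helper a b path → Spec_vasily_helper a b path (vasily_helper a b path)

-- ===== LEMMAS AND PROOFS =====

-- the chains of values produced by the operations *2 and *10+1, from a up to b
inductive PvChain : Int → Int → List Int → Prop
  | refl (a : Int) : PvChain a a [a]
  | dbl {a b : Int} {l : List Int} : PvChain (a * 2) b l → PvChain a b (a :: l)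
  | ten {a b : Int} {l : List Int} : PvChain (a * 10 + 1) b l → PvChain a b (a :: l)

theorem pvChain_le {a b : Int} {l : List Int} (h : PvChain a b l) (ha : 1 ≤ a) : a ≤ b := by
  induction h with
  | refl => omega
  | dbl h ih => have := ih (by omega); omega
  | ten h ih => have := ih (by omega); omega

theorem pvChain_self {a : Int} {l : List Int} (h : PvChain a a l) (ha : 1 ≤ a) : l = [a] := by
  cases h with
  | refl => rfl
  | dbl h => have := pvChain_le h (by omega); omega
  | ten h => have := pvChain_le h (by omega); omega

theorem pvChain_last {a b : Int} {l : List Int} (h : PvChain a b l) : l.getLast? = some b := by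
  induction h with
  | refl => rfl
  | dbl h ih => rw [List.getLast?_cons, ih]; exact Option.getD_some ▸ rfl
  | ten h ih => rw [List.getLast?_cons, ih]; exact Option.getD_some ▸ rfl

theorem pvChain_snoc {a b : Int} {l : List Int} (h : PvChain a b l) (ha : 1 ≤ a) (hne : a ≠ b) :
    ∃ l' p, l = l' ++ [b] ∧ PvChain a p l' ∧ (p * 2 = b ∨ p * 10 + 1 = b) := by
  induction h with
  | refl => exact absurd rfl hne
  | @dbl a b l h ih =>
    by_cases he : a * 2 = b
    · subst he
      have := pvChain_self h (by omega)
      exact ⟨[a], a, by simp [this], PvChain.refl a, Or.inl rfl⟩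
    · obtain ⟨l', p, hl, hc, hp⟩ := ih (by omega) he
      exact ⟨a :: l', p, by simp [hl], PvChain.dbl hc, hp⟩
  | @ten a b l h ih =>
    by_cases he : a * 10 + 1 = b
    · subst he
      have := pvChain_self h (by omega)
      exact ⟨[a], a, by simp [this], PvChain.refl a, Or.inr rfl⟩
    · obtain ⟨l', p, hl, hc, hp⟩ := ih (by omega) he
      exact ⟨a :: l', p, by simp [hl], PvChain.ten hc, hp⟩

theorem pvChain_unique {a : Int} (ha : 1 ≤ a) :
    ∀ (n : Nat) (b : Int) (l m : List Int), b.toNat ≤ n →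
      PvChain a b l → PvChain a b m → l = m := by
  intro n
  induction n with
  | zero =>
    intro b l m hb hl hm
    have h1 := pvChain_le hl ha
    have hb' : b = a := by omega
    subst hb'
    rw [pvChain_self hl ha, pvChain_self hm ha]
  | succ n ih =>
    intro b l m hb hl hm
    by_cases he : a = b
    · subst he
      rw [pvChain_self hl ha, pvChain_self hm ha]
    · obtain ⟨l', p, hleq, hlc, hpp⟩ := pvChain_snoc hl ha he
      obtain ⟨m', q, hmeq, hmc, hqq⟩ := pvChain_snoc hm ha he
      have hap : a ≤ p := pvChain_le hlc ha
      have haq : a ≤ q := pvChain_le hmc ha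
      have hpq : p = q := by
        rcases hpp with h1 | h1 <;> rcases hqq with h2 | h2 <;> omega
      subst hpq
      have hlt : p.toNat ≤ n := by omega
      rw [hleq, hmeq, ih p l' m' hlt hlc hmc]

-- chains can be extended at the top
theorem pvChain_app2 {a p : Int} {l : List Int} (h : PvChain a p l) :
    PvChain a (p * 2) (l ++ [p * 2]) := by
  induction h with
  | refl a => exact PvChain.dbl (PvChain.refl (a * 2))
  | dbl h ih => exact PvChain.dbl ih
  | ten h ih => exact PvChain.ten ih

theorem pvChain_app10 {a p : Int} {l : List Int} (h : PvChain a p l) :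
    PvChain a (p * 10 + 1) (l ++ [p * 10 + 1]) := by
  induction h with
  | refl a => exact PvChain.ten (PvChain.refl (a * 10 + 1))
  | dbl h ih => exact PvChain.dbl ih
  | ten h ih => exact PvChain.ten ih

-- unfolding lemmas for goA
theorem goA_gt {f : Nat} {a b : Int} {path : List Int} (h : a > b) :
    goA (f+1) a b path = none := by
  simp [goA, h]

theorem goA_eq {f : Nat} {a b : Int} {path : List Int} (he : a = b) :
    goA (f+1) a b path = some (path ++ [a]) := by
  simp [goA, he]

theorem goA_step {f : Nat} {a b : Int} {path : List Int} (h : ¬ a > b) (he : ¬ a = b) :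
    goA (f+1) a b path =
      (if pvTruthyA (goA f (a * 2) b (path ++ [a])) then goA f (a * 2) b (path ++ [a])
       else if pvTruthyA (goA f (a * 10 + 1) b (path ++ [a])) then goA f (a * 10 + 1) b (path ++ [a])
       else none) := by
  simp [goA, h, he]

-- A soundness: any returned value is path ++ (a chain from a to b)
theorem goA_sound : ∀ (f : Nat) (a b : Int) (path r : List Int),
    goA f a b path = some r → ∃ l, PvChain a b l ∧ r = path ++ l := by
  intro f
  induction f with
  | zero => intro a b path r h; simp [goA] at h
  | succ f ih =>
    intro a b path r h
    by_cases hgt : a > b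
    · rw [goA_gt hgt] at h; exact absurd h (by simp)
    · by_cases he : a = b
      · rw [goA_eq he] at h
        exact ⟨[a], he ▸ PvChain.refl a, by simpa using h.symm⟩
      · rw [goA_step hgt he] at h
        split at h
        · obtain ⟨l1, hc1, hr1⟩ := ih _ _ _ _ h
          exact ⟨a :: l1, PvChain.dbl hc1, by simp [hr1]⟩
        · split at h
          · obtain ⟨l2, hc2, hr2⟩ := ih _ _ _ _ h
            exact ⟨a :: l2, PvChain.ten hc2, by simp [hr2]⟩
          · exact absurd h (by simp)

-- A completeness: with enough fuel, if a chain exists then A returns some value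
theorem goA_complete {a b : Int} {l : List Int} (h : PvChain a b l) (ha : 1 ≤ a) :
    ∀ (f : Nat) (path : List Int), (b - a).toNat + 1 ≤ f →
      ∃ r, goA f a b path = some r := by
  induction h with
  | refl a =>
    intro f path hf
    obtain ⟨f, rfl⟩ : ∃ g, f = g + 1 := ⟨f - 1, by omega⟩
    exact ⟨path ++ [a], goA_eq rfl⟩
  | @dbl a b l h ih =>
    intro f path hf
    obtain ⟨f, rfl⟩ : ∃ g, f = g + 1 := ⟨f - 1, by omega⟩
    have hab : a * 2 ≤ b := pvChain_le h (by omega)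
    obtain ⟨r1, hr1⟩ := ih (by omega) f (path ++ [a]) (by omega)
    obtain ⟨l1, hc1, rfl⟩ := goA_sound _ _ _ _ _ hr1
    have ht : pvTruthyA (goA f (a * 2) b (path ++ [a])) = true := by
      rw [hr1]; simp [pvTruthyA]
    refine ⟨(path ++ [a]) ++ l1, ?_⟩
    rw [goA_step (by omega) (by omega), if_pos ht, hr1]
  | @ten a b l h ih =>
    intro f path hf
    obtain ⟨f, rfl⟩ : ∃ g, f = g + 1 := ⟨f - 1, by omega⟩
    have hab : a * 10 + 1 ≤ b := pvChain_le h (by omega)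
    rw [goA_step (by omega) (by omega)]
    cases hcase : goA f (a * 2) b (path ++ [a]) with
    | some r1 =>
      obtain ⟨l1, hc1, rfl⟩ := goA_sound _ _ _ _ _ hcase
      have ht : pvTruthyA (goA f (a * 2) b (path ++ [a])) = true := by
        rw [hcase]; simp [pvTruthyA]
      refine ⟨(path ++ [a]) ++ l1, ?_⟩
      simp [pvTruthyA]
    | none =>
      obtain ⟨r2, hr2⟩ := ih (by omega) f (path ++ [a]) (by omega)
      obtain ⟨l2, hc2, rfl⟩ := goA_sound _ _ _ _ _ hr2
      have ht : pvTruthyA (goA f (a * 10 + 1) b (path ++ [a])) = true := by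
        rw [hr2]; simp [pvTruthyA]
      refine ⟨(path ++ [a]) ++ l2, ?_⟩
      rw [if_neg (by simp [pvTruthyA]), if_pos ht, hr2]

-- floordiv/mod with a positive divisor are Euclidean
theorem pv_floordiv_two {c : Int} : PySem.Int.floordiv c 2 = c / 2 :=
  PySem.Int.floordiv_eq_ediv_of_pos (by omega)

theorem pv_floordiv_ten {c : Int} : PySem.Int.floordiv c 10 = c / 10 :=
  PySem.Int.floordiv_eq_ediv_of_pos (by omega)

theorem pv_mod_two {c : Int} : PySem.Int.mod c 2 = c % 2 :=
  PySem.Int.mod_eq_emod_of_pos (by omega)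

theorem pv_mod_ten {c : Int} : PySem.Int.mod c 10 = c % 10 :=
  PySem.Int.mod_eq_emod_of_pos (by omega)

-- B, positive case, when the chain exists
theorem goB_some {a : Int} (ha : 1 ≤ a) :
    ∀ (f : Nat) (cur : Int) (l vals path : List Int),
      (cur - a).toNat + 1 ≤ f → PvChain a cur l →
      goB f a cur vals path = some (path ++ (vals ++ l.reverse.tail).reverse) := by
  intro f
  induction f with
  | zero => intro cur l vals path hf; omega
  | succ f ih =>
    intro cur l vals path hf hc
    by_cases he : cur = a
    · subst he
      rw [pvChain_self hc ha]
      simp [goB]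
    · have hac : a ≤ cur := pvChain_le hc ha
      have hgt : cur > a := by omega
      obtain ⟨l', p, rfl, hc', hp⟩ := pvChain_snoc hc ha (by omega)
      have hap : a ≤ p := pvChain_le hc' ha
      have hlast : l'.reverse = p :: l'.reverse.tail := by
        have h1 := pvChain_last hc'
        have h2 : l'.reverse.head? = some p := by
          rw [List.head?_reverse]; exact h1
        cases hrev : l'.reverse with
        | nil => simp [hrev] at h2
        | cons x xs => rw [hrev] at h2; simp at h2; simp [h2]
      unfold goB
      rw [if_pos hgt]
      rcases hp with hp | hp
      · have hmod : PySem.Int.mod cur 2 = 0 := by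
          rw [pv_mod_two]; omega
        have hdiv : PySem.Int.floordiv cur 2 = p := by
          rw [pv_floordiv_two]; omega
        rw [if_pos hmod, hdiv]
        rw [ih p l' (vals ++ [p]) path (by omega) hc']
        have h1 : (l' ++ [cur]).reverse.tail = l'.reverse := by simp
        rw [h1]
        conv_rhs => rw [hlast]
        simp
      · have hodd : ¬ (PySem.Int.mod cur 2 = 0) := by
          rw [pv_mod_two]; omega
        have hmod : PySem.Int.mod cur 10 = 1 := by
          rw [pv_mod_ten]; omega
        have hdiv : PySem.Int.floordiv cur 10 = p := by
          rw [pv_floordiv_ten]; omega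
        rw [if_neg hodd, if_pos hmod, hdiv]
        rw [ih p l' (vals ++ [p]) path (by omega) hc']
        have h1 : (l' ++ [cur]).reverse.tail = l'.reverse := by simp
        rw [h1]
        conv_rhs => rw [hlast]
        simp

-- B, negative case, when no chain exists
theorem goB_none {a : Int} (ha : 1 ≤ a) :
    ∀ (f : Nat) (cur : Int) (vals path : List Int),
      (cur - a).toNat + 1 ≤ f → (∀ l, ¬ PvChain a cur l) →
      goB f a cur vals path = none := by
  intro f
  induction f with
  | zero => intro cur vals path hf; omega
  | succ f ih =>
    intro cur vals path hf hno
    by_cases hgt : cur > a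
    · unfold goB
      rw [if_pos hgt]
      by_cases hmod : PySem.Int.mod cur 2 = 0
      · rw [if_pos hmod]
        have heven : cur % 2 = 0 := by rw [pv_mod_two] at hmod; exact hmod
        have hdiv : PySem.Int.floordiv cur 2 = cur / 2 := pv_floordiv_two
        rw [hdiv]
        apply ih (cur / 2) _ path (by omega)
        intro l hl
        have := pvChain_app2 hl
        have h2 : cur / 2 * 2 = cur := by omega
        rw [h2] at this
        exact hno _ this
      · rw [if_neg hmod]
        by_cases hmod10 : PySem.Int.mod cur 10 = 1
        · rw [if_pos hmod10]
          have hten : cur % 10 = 1 := by rw [pv_mod_ten] at hmod10; exact hmod10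
          have hdiv : PySem.Int.floordiv cur 10 = cur / 10 := pv_floordiv_ten
          rw [hdiv]
          apply ih (cur / 10) _ path (by omega)
          intro l hl
          have := pvChain_app10 hl
          have h2 : cur / 10 * 10 + 1 = cur := by omega
          rw [h2] at this
          exact hno _ this
        · rw [if_neg hmod10]
    · by_cases he : cur = a
      · exact absurd (he ▸ PvChain.refl a) (hno [a])
      · unfold goB
        rw [if_neg hgt, if_neg he]

-- ===== VERDICT (by name: the statement is the Claim_ definition above) =====
theorem vasily_helper_spec : Claim_equal_vasily_helper := by
  intro a b path _ hpre
  show vasily_helper a b path = vasily_helper_alt a b path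
  unfold vasily_helper vasily_helper_alt
  by_cases hgt : a > b
  · rw [if_pos hgt]
    obtain ⟨f, hf⟩ : ∃ g, (b - a).toNat + 1 = g + 1 := ⟨(b - a).toNat, rfl⟩
    rw [hf]
    simp [goA, hgt]
  · rw [if_neg hgt]
    by_cases heq : a = b
    · subst heq
      simp [goA, goB]
    · have ha : 1 ≤ a := by
        rcases hpre with h | h | h <;> omega
      have hab : a < b := by omega
      by_cases hch : ∃ l, PvChain a b l
      · obtain ⟨l, hl⟩ := hch
        obtain ⟨r, hr⟩ := goA_complete hl ha ((b - a).toNat + 1) path (le_refl _)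
        obtain ⟨l', hl', rfl⟩ := goA_sound _ _ _ _ _ hr
        have : l' = l := pvChain_unique ha b.toNat b l' l (le_refl _) hl' hl
        subst this
        rw [hr, goB_some ha _ b l' [b] path (by omega) hl']
        have hlast : l'.reverse = b :: l'.reverse.tail := by
          have h1 := pvChain_last hl'
          have h2 : l'.reverse.head? = some b := by
            rw [List.head?_reverse]; exact h1
          cases hrev : l'.reverse with
          | nil => simp [hrev] at h2
          | cons x xs => rw [hrev] at h2; simp at h2; simp [h2]
        congr 1
        conv_rhs => rw [show ([b] ++ l'.reverse.tail : List Int) = l'.reverse from by rw [hlast]; rfl]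
        rw [List.reverse_reverse]
      · push Not at hch
        rw [goB_none ha _ b [b] path (by omega) hch]
        cases hA : goA ((b - a).toNat + 1) a b path with
        | none => rfl
        | some r =>
          obtain ⟨l, hl, _⟩ := goA_sound _ _ _ _ _ hA
          exact absurd hl (hch l)
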